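-- pv_equiv track=rewrite | github.com/rdowning07/starter-town-tactics | map_loader.py | validate_map
-- ===== SOURCE A (Python) =====
-- from typing import List
--
-- def validate_map(terrain_grid: List[List[str]]) -> bool:
--     """
--     Validate that a terrain grid is properly formatted.
--
--     Args:
--         terrain_grid: 2D list representing the terrain
--
--     Returns:
--         True if the map is valid, False otherwise
--     """
--     if not terrain_grid:
--         return False
--
--     if not all(isinstance(row, list) for row in terrain_grid):
--         return False
--
--     # Check that all rows have the same length
--     row_lengths = [len(row) for row in terrain_grid]
--     if len(set(row_lengths)) > 1:
--         return False
--
--     # Check that all cells contain strings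
--     for row in terrain_grid:
--         if not all(isinstance(cell, str) for cell in row):
--             return False
--
--     return True
-- ===== SOURCE B (Python) =====
-- def validate_map(terrain_grid):
--     """Single-pass validation: compare each row's length to the first row's,
--     checking row/cell types along the way (no row_lengths list, no set)."""
--     if not terrain_grid:
--         return False
--     expected_len = None
--     for row in terrain_grid:
--         if not isinstance(row, list):
--             return False
--         if expected_len is None:
--             expected_len = len(row)
--         elif len(row) != expected_len:
--             return False
--         if not all(isinstance(cell, str) for cell in row):
--             return False
--     return True
-- ===== Notes on version B (the rewrite author's own statement) =====
-- stated objective: simpler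
-- what changed: Replaces A's three sequential passes (isinstance scan, a row_lengths list collapsed through set() to test uniqueness, then a cell-type loop) with one loop that keeps a single running expected_len scalar captured from the first row and checks row type, length and cell types as it goes.
import Mathlib
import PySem

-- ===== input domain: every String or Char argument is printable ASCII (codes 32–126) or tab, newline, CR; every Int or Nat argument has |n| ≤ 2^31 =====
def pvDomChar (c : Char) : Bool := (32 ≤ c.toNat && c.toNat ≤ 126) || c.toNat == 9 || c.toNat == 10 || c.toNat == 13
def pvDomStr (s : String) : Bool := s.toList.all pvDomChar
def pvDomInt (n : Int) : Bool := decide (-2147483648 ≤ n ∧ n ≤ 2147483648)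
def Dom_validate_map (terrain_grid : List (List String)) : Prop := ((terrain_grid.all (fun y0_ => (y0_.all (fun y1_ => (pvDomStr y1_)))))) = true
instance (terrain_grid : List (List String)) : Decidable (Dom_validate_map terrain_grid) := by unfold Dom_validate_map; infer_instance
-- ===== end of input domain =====

-- B fuses A's three passes (type scan, row_lengths + set() uniqueness test, cell-type loop)
-- into one loop comparing each row's length to a running expected length; objective: simpler.


-- ===== PORT A =====
-- 'for row: if not all(isinstance(cell,str) for cell in row): return False' — under the
-- type convention every cell IS a String, so the isinstance test is literally 'true' per cell
def pyCellLoop : List (List String) → Bool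
  | [] => true
  | row :: rest =>
      if !(row.all (fun _cell => true)) then false else pyCellLoop rest

def validate_map (terrain_grid : List (List String)) : Bool :=
  if terrain_grid.isEmpty then false
  else if !(terrain_grid.all (fun _row => true)) then false  -- isinstance(row, list): always true here
  else
    let row_lengths := terrain_grid.map (fun row => row.length)
    if (PySem.Set.ofList row_lengths).length > 1 then false
    else pyCellLoop terrain_grid

-- ===== PORT B =====
-- the loop body of Source B, carrying expected_len : Option Nat (None before the first row)
def bLoop : List (List String) → Option Nat → Bool
  | [], _ => true
  | row :: rest, none =>
      if !(row.all (fun _cell => true)) then false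
      else bLoop rest (some row.length)
  | row :: rest, some n =>
      if row.length ≠ n then false
      else if !(row.all (fun _cell => true)) then false
      else bLoop rest (some n)

def validate_map_alt (terrain_grid : List (List String)) : Bool :=
  if terrain_grid.isEmpty then false
  else bLoop terrain_grid none

-- ===== PRECONDITION & SPEC =====
def Spec_validate_map (terrain_grid : List (List String)) (out : Bool) : Prop := out = validate_map_alt terrain_grid
instance (terrain_grid : List (List String)) (out : Bool) : Decidable (Spec_validate_map terrain_grid out) := by unfold Spec_validate_map; infer_instance

-- ===== CLAIM (what is proved, stated in full; the proofs are below) =====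
def Claim_equal_validate_map : Prop := ∀ (terrain_grid : List (List String)), Dom_validate_map terrain_grid → Spec_validate_map terrain_grid (validate_map terrain_grid)

-- ===== LEMMAS AND PROOFS =====

theorem pyCellLoop_true (g : List (List String)) : pyCellLoop g = true := by
  induction g with
  | nil => rfl
  | cons r rs ih => simp [pyCellLoop, ih]

theorem bLoop_some (rs : List (List String)) (n : Nat) :
    bLoop rs (some n) = rs.all (fun row => row.length = n) := by
  induction rs with
  | nil => rfl
  | cons r rs ih =>
    by_cases h : r.length = n <;> simp [bLoop, h, ih]

theorem le_length_foldl_add (ls : List Nat) (s : List Nat) :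
    s.length ≤ (List.foldl PySem.Set.add s ls).length := by
  induction ls generalizing s with
  | nil => simp
  | cons m ls ih =>
    refine le_trans ?_ (ih (PySem.Set.add s m))
    rw [PySem.Set.add_eq_ite]
    split <;> simp

theorem setlen_one (ls : List Nat) (n : Nat) :
    ((List.foldl PySem.Set.add [n] ls).length ≤ 1) = ls.all (fun m => m = n) := by
  induction ls with
  | nil => simp
  | cons m ls ih =>
    by_cases h : m = n
    · subst h
      simp only [List.foldl_cons, List.all_cons]
      rw [PySem.Set.add_of_mem (by simp)]
      simp [ih]
    · simp only [List.foldl_cons, List.all_cons]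
      rw [PySem.Set.add_of_not_mem (by simp [h])]
      have h2 : 2 ≤ (List.foldl PySem.Set.add [n, m] ls).length :=
        le_trans (by simp) (le_length_foldl_add ls [n, m])
      simp only [List.cons_append, List.nil_append] at *
      simp [h]
      omega

-- ===== VERDICT (by name: the statement is the Claim_ definition above) =====
theorem validate_map_spec : Claim_equal_validate_map := by
  intro g _
  unfold Spec_validate_map validate_map validate_map_alt
  cases g with
  | nil => rfl
  | cons r rs =>
    simp only [List.isEmpty_cons, Bool.false_eq_true, if_false]
    rw [pyCellLoop_true]
    simp only [List.map_cons]
    rw [show bLoop (r :: rs) none = bLoop rs (some r.length) by simp [bLoop]]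
    rw [bLoop_some]
    have := setlen_one (rs.map (fun row => row.length)) r.length
    by_cases hall : rs.all (fun row => row.length = r.length)
    · have hle : (PySem.Set.ofList (r.length :: rs.map (fun row => row.length))).length ≤ 1 := by
        rw [PySem.Set.ofList_eq_foldl]
        simp only [List.foldl_cons]
        rw [show PySem.Set.add [] r.length = [r.length] from rfl]
        rw [this]
        simpa [List.all_eq_true] using hall
      have hnl : ¬ 1 < (PySem.Set.ofList (r.length :: rs.map (fun row => row.length))).length :=
        Nat.not_lt.mpr hle
      simp only [hnl]
      simpa using hall
    · have hgt : ¬ (PySem.Set.ofList (r.length :: rs.map (fun row => row.length))).length ≤ 1 := by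
        rw [PySem.Set.ofList_eq_foldl]
        simp only [List.foldl_cons]
        rw [show PySem.Set.add [] r.length = [r.length] from rfl]
        rw [this]
        simpa [List.all_eq_true] using hall
      have hl : 1 < (PySem.Set.ofList (r.length :: rs.map (fun row => row.length))).length :=
        Nat.lt_of_not_le hgt
      simp only [hl]
      simpa using hall
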